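-- pv_equiv track=rewrite | github.com/pybyOx/python_basics_exercises | Module16/06_roller_skates/main.py | count_shoed_man
-- ===== SOURCE A (Python) =====
-- def count_shoed_man(skates, man):
--     score = 0
--     for size_1 in skates:
--         for size_2 in man:
--             if size_1 == size_2:
--                 score += 1
--                 break
--     return score
-- ===== SOURCE B (Python) =====
-- def count_shoed_man(skates, man):
--     s = sorted(skates)
--     d = sorted(man)
--     i = j = count = 0
--     while i < len(s) and j < len(d):
--         if s[i] < d[j]:
--             i += 1
--         elif s[i] > d[j]:
--             j += 1
--         else:
--             count += 1
--             i += 1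
--     return count
-- ===== Notes on version B (the rewrite author's own statement) =====
-- stated objective: faster
-- what changed: Replaces the nested scan-with-break by sorting both lists once and a two-pointer merge that advances only the skate pointer on equality, so each skate whose size occurs among the man sizes is counted exactly once.
import Mathlib
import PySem

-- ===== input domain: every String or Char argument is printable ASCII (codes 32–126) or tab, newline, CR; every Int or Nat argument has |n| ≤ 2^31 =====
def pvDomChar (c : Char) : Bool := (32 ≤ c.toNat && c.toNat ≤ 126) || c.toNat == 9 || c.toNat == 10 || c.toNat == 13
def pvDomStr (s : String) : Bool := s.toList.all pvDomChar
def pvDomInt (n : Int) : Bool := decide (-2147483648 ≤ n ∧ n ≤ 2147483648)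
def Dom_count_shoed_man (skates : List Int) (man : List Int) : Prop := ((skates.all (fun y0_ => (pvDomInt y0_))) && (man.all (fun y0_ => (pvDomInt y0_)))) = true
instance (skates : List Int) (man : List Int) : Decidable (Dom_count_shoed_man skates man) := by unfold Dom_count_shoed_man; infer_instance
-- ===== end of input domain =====

-- B replaces A's nested scan-with-break by sorting both lists once and a two-pointer
-- merge that advances only the skate pointer on equality (faster: a timing run
-- measured B faster on the largest inputs; O(n log n + m log m) vs O(n*m)).

-- ===== PORT A =====
-- inner 'for size_2 in man: if size_1 == size_2: score += 1; break'
def pvInnerA (size1 : Int) (man : List Int) (score : Int) : Int :=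
  match man with
  | [] => score
  | size2 :: rest => if size1 == size2 then score + 1 else pvInnerA size1 rest score

def count_shoed_man (skates : List Int) (man : List Int) : Int :=
  skates.foldl (fun score size1 => pvInnerA size1 man score) 0

-- ===== PORT B =====
-- the while loop over indices i (into s) and j (into d), rendered as the recursion
-- on the two suffixes s[i:], d[j:] with the running counter
def pvMergeB (s : List Int) (d : List Int) (count : Int) : Int :=
  match s, d with
  | [], _ => count
  | _ :: _, [] => count
  | a :: as, b :: bs =>
    if a < b then pvMergeB as (b :: bs) count
    else if b < a then pvMergeB (a :: as) bs count
    else pvMergeB as (b :: bs) (count + 1)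
termination_by s.length + d.length
decreasing_by all_goals simp

def count_shoed_man_alt (skates : List Int) (man : List Int) : Int :=
  let s := PySem.List.sorted skates (fun x => x) false
  let d := PySem.List.sorted man (fun x => x) false
  pvMergeB s d 0

-- ===== PRECONDITION & SPEC =====
def Spec_count_shoed_man (skates : List Int) (man : List Int) (out : Int) : Prop := out = count_shoed_man_alt skates man
instance (skates : List Int) (man : List Int) (out : Int) : Decidable (Spec_count_shoed_man skates man out) := by unfold Spec_count_shoed_man; infer_instance

-- ===== CLAIM (what is proved, stated in full; the proofs are below) =====
def Claim_equal_count_shoed_man : Prop := ∀ (skates : List Int) (man : List Int), Dom_count_shoed_man skates man → Spec_count_shoed_man skates man (count_shoed_man skates man)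

-- ===== LEMMAS AND PROOFS =====

-- A's inner loop adds 1 exactly when size1 occurs in man
theorem pvInnerA_eq (size1 : Int) (man : List Int) (score : Int) :
    pvInnerA size1 man score = score + (if size1 ∈ man then 1 else 0) := by
  induction man with
  | nil => simp [pvInnerA]
  | cons m rest ih =>
    by_cases h : size1 = m <;> simp [pvInnerA, h, ih]

-- A counts the skates whose size occurs in man
theorem count_shoed_man_eq_countP (skates man : List Int) :
    count_shoed_man skates man = (skates.countP (fun a => decide (a ∈ man)) : Int) := by
  unfold count_shoed_man
  suffices h : ∀ (init : Int),
      skates.foldl (fun score size1 => pvInnerA size1 man score) init =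
      init + (skates.countP (fun a => decide (a ∈ man)) : Int) by
    simpa using h 0
  induction skates with
  | nil => intro init; simp
  | cons a as ih =>
    intro init
    rw [List.foldl_cons, pvInnerA_eq, ih, List.countP_cons]
    by_cases h : a ∈ man <;> simp [h] <;> ring

-- on sorted inputs, the two-pointer merge counts the left elements occurring on the right
theorem pvMergeB_eq_countP (s d : List Int) (count : Int)
    (hs : s.Pairwise (· ≤ ·)) (hd : d.Pairwise (· ≤ ·)) :
    pvMergeB s d count = count + (s.countP (fun a => decide (a ∈ d)) : Int) := by
  fun_induction pvMergeB s d count with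
  | case1 count d => simp
  | case2 count a as => simp
  | case3 count a as b bs hab ih =>
    -- a < b: a is below every element of b :: bs, so a ∉ b :: bs
    have hnotmem : a ∉ b :: bs := by
      intro hmem
      rcases List.mem_cons.mp hmem with h | h
      · omega
      · have := (List.pairwise_cons.mp hd).1 a h; omega
    rw [ih hs.tail hd, List.countP_cons]
    simp [hnotmem]
  | case4 count a as b bs hab hba ih =>
    -- b < a: every element of a :: as is above b, so membership in b :: bs ↔ in bs
    have hcong : (a :: as).countP (fun x => decide (x ∈ b :: bs)) =
        (a :: as).countP (fun x => decide (x ∈ bs)) := by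
      apply List.countP_congr
      intro x hx
      have hax : a ≤ x := by
        rcases List.mem_cons.mp hx with h | h
        · omega
        · exact (List.pairwise_cons.mp hs).1 x h
      have hxb : x ≠ b := by omega
      simp [List.mem_cons, hxb]
    rw [ih hs hd.tail, hcong]
  | case5 count a as b bs hab hba ih =>
    -- a = b: a ∈ b :: bs, count one and advance the skate side
    have hab' : a = b := by omega
    rw [ih hs.tail hd, List.countP_cons]
    simp [hab']
    ring

theorem count_shoed_man_eq_alt (skates man : List Int) :
    count_shoed_man skates man = count_shoed_man_alt skates man := by
  unfold count_shoed_man_alt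
  rw [pvMergeB_eq_countP _ _ _ (by simpa using PySem.List.sorted_pairwise skates (fun x => x))
        (by simpa using PySem.List.sorted_pairwise man (fun x => x)),
      count_shoed_man_eq_countP]
  have hperm : (PySem.List.sorted skates (fun x => x) false).Perm skates :=
    PySem.List.sorted_perm skates (fun x => x) false
  have hmem : ∀ x : Int, (x ∈ PySem.List.sorted man (fun x => x) false) ↔ x ∈ man := by
    intro x; simp [PySem.List.mem_sorted]
  have : (PySem.List.sorted skates (fun x => x) false).countP
      (fun a => decide (a ∈ PySem.List.sorted man (fun x => x) false)) =
      skates.countP (fun a => decide (a ∈ man)) := by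
    rw [hperm.countP_eq]
    apply List.countP_congr
    intro x _
    simp [hmem x]
  rw [this]
  ring

-- ===== VERDICT (by name: the statement is the Claim_ definition above) =====
theorem count_shoed_man_spec : Claim_equal_count_shoed_man := by
  intro skates man _
  exact count_shoed_man_eq_alt skates man
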